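-- pv_equiv track=rewrite | github.com/athithya12/common-algorithms-templates | grid_bfs.py | bfs
-- ===== SOURCE A (Python) =====
-- from typing import List, Tuple
-- from collections import deque
--
-- def bfs(grid: List[List[int]], start: Tuple[int, int]) -> List[Tuple[int, int]]:
--     rows, cols = len(grid), len(grid[0])
--     visited = set()
--     queue = deque([start])
--     result = []
--
--     directions = [(-1, 0), (1, 0), (0, -1), (0, 1)]  # Up, Down, Left, Right
--
--     while queue:
--         x, y = queue.popleft()
--         if (x, y) not in visited:
--             visited.add((x, y))
--             result.append((x, y))
--
--             for dx, dy in directions: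
--                 nx, ny = x + dx, y + dy
--                 if (
--                     0 <= nx < rows
--                     and 0 <= ny < cols
--                     and (nx, ny) not in visited
--                     and grid[nx][ny] == 1
--                 ):
--                     queue.append((nx, ny))
--
--     return result
-- ===== SOURCE B (Python) =====
-- def bfs(grid, start):
--     rows, cols = len(grid), len(grid[0])
--     directions = [(-1, 0), (1, 0), (0, -1), (0, 1)]  # Up, Down, Left, Right
--     visited = set()
--     result = []
--     frontier = [start]
--     while frontier:
--         next_frontier = []
--         for (x, y) in frontier:
--             if (x, y) in visited:
--                 continue
--             visited.add((x, y))
--             result.append((x, y))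
--             for dx, dy in directions:
--                 nx, ny = x + dx, y + dy
--                 if 0 <= nx < rows and 0 <= ny < cols and (nx, ny) not in visited and grid[nx][ny] == 1:
--                     next_frontier.append((nx, ny))
--         frontier = next_frontier
--     return result
-- ===== Notes on version B (the rewrite author's own statement) =====
-- stated objective: idiomatic
-- what changed: Replaced the single-deque pop-one-cell-at-a-time loop with a level-synchronous BFS: an outer while over whole frontier lists that builds next_frontier by a nested for over the current level, removing the deque entirely.
-- outside the precondition, e.g. on bfs([], (0, 0)): A raises IndexError, B raises IndexError; on bfs([[0, 0], [0], [1]], (0, 0)): A returns [(0, 0)], B returns [(0, 0)]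
import Mathlib
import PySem

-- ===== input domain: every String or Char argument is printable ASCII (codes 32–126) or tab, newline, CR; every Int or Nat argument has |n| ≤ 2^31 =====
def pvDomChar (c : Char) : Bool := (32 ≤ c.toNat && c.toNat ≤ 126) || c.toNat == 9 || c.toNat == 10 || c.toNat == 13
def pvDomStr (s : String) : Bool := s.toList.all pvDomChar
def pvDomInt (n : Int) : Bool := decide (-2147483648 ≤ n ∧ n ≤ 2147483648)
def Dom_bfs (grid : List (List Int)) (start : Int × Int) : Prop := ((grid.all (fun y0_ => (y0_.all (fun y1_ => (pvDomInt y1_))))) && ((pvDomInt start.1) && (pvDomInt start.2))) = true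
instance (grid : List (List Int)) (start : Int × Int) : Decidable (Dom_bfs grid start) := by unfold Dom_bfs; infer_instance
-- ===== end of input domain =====

-- B replaces A's single-deque pop-one-cell BFS loop by a level-synchronous BFS over whole
-- frontier lists (idiomatic decomposition, same cost); the traversal order is proved identical.

-- ===== PORT A =====
-- rows, cols = len(grid), len(grid[0])   (grid[0] exists under Pre_bfs)
def pvRows (grid : List (List Int)) : Int := PySem.List.len grid
def pvCols (grid : List (List Int)) : Int := PySem.List.len (PySem.List.pyGetD grid 0 [])
-- directions = [(-1, 0), (1, 0), (0, -1), (0, 1)]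
def pvDirs : List (Int × Int) := [(-1, 0), (1, 0), (0, -1), (0, 1)]
-- the inner `for dx, dy in directions` loop: the in-bounds, unvisited, value-1 neighbours of
-- (x, y), in direction order (A appends them to the queue, B to next_frontier)
def pvNbrs (grid : List (List Int)) (v : PySem.Set (Int × Int)) (c : Int × Int) :
    List (Int × Int) :=
  (pvDirs.map (fun d => (c.1 + d.1, c.2 + d.2))).filter (fun n =>
    decide (0 ≤ n.1) && decide (n.1 < pvRows grid) && decide (0 ≤ n.2) &&
    decide (n.2 < pvCols grid) && !decide (n ∈ v) &&
    (PySem.List.pyGetD (PySem.List.pyGetD grid n.1 []) n.2 0 == 1))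
-- every cell that can ever sit in the queue/frontier: start, or an in-bounds cell
-- (used only for the termination measure)
def pvCells (grid : List (List Int)) (start : Int × Int) : List (Int × Int) :=
  start :: (PySem.List.pyRange 0 (pvRows grid) 1).flatMap
    (fun i => (PySem.List.pyRange 0 (pvCols grid) 1).map (fun j => (i, j)))
-- number of not-yet-visited candidate cells (termination measure component)
def pvUnvis (grid : List (List Int)) (start : Int × Int) (v : PySem.Set (Int × Int)) : Nat :=
  ((pvCells grid start).filter (fun x => !decide (x ∈ v))).length

theorem pvNbrs_subset_cells (grid : List (List Int)) (start : Int × Int)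
    (v : PySem.Set (Int × Int)) (c x : Int × Int) (hx : x ∈ pvNbrs grid v c) :
    x ∈ pvCells grid start := by
  unfold pvNbrs at hx
  have hx' := List.of_mem_filter hx
  simp only [Bool.and_eq_true, decide_eq_true_eq] at hx'
  obtain ⟨⟨⟨⟨⟨h1, h2⟩, h3⟩, h4⟩, -⟩, -⟩ := hx'
  obtain ⟨a, b⟩ := x
  unfold pvCells
  exact List.mem_cons_of_mem _ (List.mem_flatMap.mpr
    ⟨a, PySem.List.mem_pyRange_one.mpr ⟨h1, h2⟩,
     List.mem_map.mpr ⟨b, PySem.List.mem_pyRange_one.mpr ⟨h3, h4⟩, rfl⟩⟩)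

theorem pvUnvis_le (grid : List (List Int)) (start : Int × Int)
    (v : PySem.Set (Int × Int)) (c : Int × Int) :
    pvUnvis grid start (PySem.Set.add v c) ≤ pvUnvis grid start v := by
  unfold pvUnvis
  refine List.Sublist.length_le (List.monotone_filter_right _ ?_)
  intro x hx
  simp only [Bool.not_eq_eq_eq_not, Bool.not_true, decide_eq_false_iff_not,
    PySem.Set.mem_add] at hx ⊢
  tauto

theorem pvUnvis_lt (grid : List (List Int)) (start : Int × Int)
    (v : PySem.Set (Int × Int)) (c : Int × Int) (hc : c ∈ pvCells grid start) (hv : c ∉ v) :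
    pvUnvis grid start (PySem.Set.add v c) < pvUnvis grid start v := by
  unfold pvUnvis
  have hsub : ((pvCells grid start).filter (fun x => !decide (x ∈ PySem.Set.add v c))).Sublist
      ((pvCells grid start).filter (fun x => !decide (x ∈ v))) := by
    refine List.monotone_filter_right _ ?_
    intro x hx
    simp only [Bool.not_eq_eq_eq_not, Bool.not_true, decide_eq_false_iff_not,
      PySem.Set.mem_add] at hx ⊢
    tauto
  refine Nat.lt_of_le_of_ne hsub.length_le ?_
  intro hlen
  have heq := hsub.eq_of_length hlen
  have hcmem : c ∈ (pvCells grid start).filter (fun x => !decide (x ∈ v)) := by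
    rw [List.mem_filter]; simp [hc, hv]
  rw [← heq, List.mem_filter] at hcmem
  simp [PySem.Set.mem_add] at hcmem

theorem pvNbrs_len_le (grid : List (List Int)) (v : PySem.Set (Int × Int)) (c : Int × Int) :
    (pvNbrs grid v c).length ≤ 4 := by
  unfold pvNbrs
  calc _ ≤ (pvDirs.map (fun d => (c.1 + d.1, c.2 + d.2))).length := List.length_filter_le _ _
    _ = 4 := by rw [List.length_map]; rfl

-- while queue: x, y = queue.popleft(); if not visited: visit, emit, enqueue neighbours
-- (hq is only a totality guard for the termination measure; it does not affect the value)
def pvLoopA (grid : List (List Int)) (start : Int × Int) (v : PySem.Set (Int × Int)) :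
    (q : List (Int × Int)) → (res : List (Int × Int)) →
    (hq : ∀ c ∈ q, c ∈ pvCells grid start) → List (Int × Int)
  | [], res, _ => res
  | c :: q', res, hq =>
    if hc : c ∈ v then
      pvLoopA grid start v q' res (fun x hx => hq x (List.mem_cons_of_mem _ hx))
    else
      pvLoopA grid start (PySem.Set.add v c)
        (q' ++ pvNbrs grid (PySem.Set.add v c) c) (res ++ [c])
        (fun x hx => by
          rcases List.mem_append.1 hx with h | h
          · exact hq x (List.mem_cons_of_mem _ h)
          · exact pvNbrs_subset_cells grid start _ c x h)
  termination_by q => 5 * pvUnvis grid start v + q.length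
  decreasing_by
  · simp only [List.length_cons]; omega
  · have h1 := pvUnvis_lt grid start v c (hq c List.mem_cons_self) hc
    have h2 := pvNbrs_len_le grid (PySem.Set.add v c) c
    simp [List.length_append]
    omega

def bfs (grid : List (List Int)) (start : Int × Int) : List (Int × Int) :=
  pvLoopA grid start PySem.Set.empty [start] []
    (fun c hc => by rw [List.mem_singleton] at hc; exact hc ▸ List.mem_cons_self)

-- ===== PORT B =====
-- the body of `for (x, y) in frontier:` — state is (visited, result, next_frontier)
def pvStep (grid : List (List Int))
    (s : PySem.Set (Int × Int) × List (Int × Int) × List (Int × Int)) (c : Int × Int) :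
    PySem.Set (Int × Int) × List (Int × Int) × List (Int × Int) :=
  if c ∈ s.1 then s
  else (PySem.Set.add s.1 c, s.2.1 ++ [c], s.2.2 ++ pvNbrs grid (PySem.Set.add s.1 c) c)

theorem pvStep_nf_subset (grid : List (List Int)) (start : Int × Int)
    (f : List (Int × Int)) (s : PySem.Set (Int × Int) × List (Int × Int) × List (Int × Int))
    (hs : ∀ x ∈ s.2.2, x ∈ pvCells grid start) :
    ∀ x ∈ (f.foldl (pvStep grid) s).2.2, x ∈ pvCells grid start := by
  induction f generalizing s with
  | nil => exact hs
  | cons c f' ih =>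
    simp only [List.foldl_cons]
    refine ih _ ?_
    unfold pvStep
    split
    · exact hs
    · intro x hx
      rcases List.mem_append.1 hx with h | h
      · exact hs x h
      · exact pvNbrs_subset_cells grid start _ c x h

theorem pvStep_unvis_le (grid : List (List Int)) (start : Int × Int)
    (f : List (Int × Int)) (s : PySem.Set (Int × Int) × List (Int × Int) × List (Int × Int)) :
    pvUnvis grid start (f.foldl (pvStep grid) s).1 ≤ pvUnvis grid start s.1 := by
  induction f generalizing s with
  | nil => exact Nat.le_refl _
  | cons c f' ih =>
    simp only [List.foldl_cons]
    refine Nat.le_trans (ih _) ?_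
    unfold pvStep
    split
    · exact Nat.le_refl _
    · exact pvUnvis_le grid start s.1 c

-- a whole level either visits nothing new (so next_frontier stays as given) or strictly
-- shrinks the unvisited count (termination of the level loop)
theorem pvStep_progress (grid : List (List Int)) (start : Int × Int)
    (f : List (Int × Int)) (s : PySem.Set (Int × Int) × List (Int × Int) × List (Int × Int))
    (hf : ∀ c ∈ f, c ∈ pvCells grid start) :
    pvUnvis grid start (f.foldl (pvStep grid) s).1 < pvUnvis grid start s.1 ∨
      ((f.foldl (pvStep grid) s).1 = s.1 ∧ (f.foldl (pvStep grid) s).2.2 = s.2.2) := by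
  induction f generalizing s with
  | nil => exact Or.inr ⟨rfl, rfl⟩
  | cons c f' ih =>
    simp only [List.foldl_cons]
    by_cases hc : c ∈ s.1
    · have : pvStep grid s c = s := by unfold pvStep; simp [hc]
      rw [this]
      exact ih s (fun x hx => hf x (List.mem_cons_of_mem _ hx))
    · left
      have hstep : (pvStep grid s c).1 = PySem.Set.add s.1 c := by
        unfold pvStep; simp [hc]
      calc pvUnvis grid start (f'.foldl (pvStep grid) (pvStep grid s c)).1
          ≤ pvUnvis grid start (pvStep grid s c).1 := pvStep_unvis_le grid start f' _
        _ < pvUnvis grid start s.1 := by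
            rw [hstep]
            exact pvUnvis_lt grid start s.1 c (hf c List.mem_cons_self) hc

-- while frontier: build (visited, result, next_frontier) by one pass over the level,
-- then recurse on next_frontier
def pvLoopB (grid : List (List Int)) (start : Int × Int) (v : PySem.Set (Int × Int))
    (f : List (Int × Int)) (res : List (Int × Int))
    (hf : ∀ c ∈ f, c ∈ pvCells grid start) : List (Int × Int) :=
  if hne : f = [] then res
  else
    let t := f.foldl (pvStep grid) (v, res, [])
    pvLoopB grid start t.1 t.2.2 t.2.1
      (pvStep_nf_subset grid start f (v, res, []) (by intro x hx; simp at hx))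
  termination_by (pvUnvis grid start v, f.length)
  decreasing_by
    rcases pvStep_progress grid start f (v, res, []) hf with h | ⟨h1, h2⟩
    · exact Prod.Lex.left _ _ h
    · rw [h1, h2]
      refine Prod.Lex.right _ ?_
      simp
      exact List.length_pos_iff.2 hne

def bfs_alt (grid : List (List Int)) (start : Int × Int) : List (Int × Int) :=
  pvLoopB grid start PySem.Set.empty [start] []
    (fun c hc => by rw [List.mem_singleton] at hc; exact hc ▸ List.mem_cons_self)

-- ===== PRECONDITION & SPEC =====
-- Pre_bfs excludes the empty grid (len(grid[0]) raises IndexError before the loop) and the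
-- ragged grids in which a missing entry (column index < len(grid[0]) but beyond its own
-- row's length) is 4-adjacent to start or to a value-1 cell — the shapes on which the probe
-- grid[nx][ny] can raise IndexError (slightly conservative when such a cell is unreachable).
-- neighbour (x, y) is harmless: out of the nominal bounds, or inside its own row
def pvOk (grid : List (List Int)) (x y : Int) : Bool :=
  !(decide (0 ≤ x) && decide (x < (grid.length : Int)) && decide (0 ≤ y) &&
    decide (y < ((grid.headD []).length : Int))) ||
  decide (y < ((grid.getD x.toNat []).length : Int))
-- all four neighbours of (x, y) are harmless to probe
def pvSafe (grid : List (List Int)) (x y : Int) : Bool :=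
  pvOk grid (x - 1) y && pvOk grid (x + 1) y && pvOk grid x (y - 1) && pvOk grid x (y + 1)
def Pre_bfs (grid : List (List Int)) (start : Int × Int) : Prop :=
  grid ≠ [] ∧ pvSafe grid start.1 start.2 = true ∧
  ∀ i ∈ List.range grid.length, ∀ j ∈ List.range (grid.headD []).length,
    (grid.getD i []).getD j 0 = 1 → pvSafe grid (i : Int) (j : Int) = true
instance (grid : List (List Int)) (start : Int × Int) : Decidable (Pre_bfs grid start) := by
  unfold Pre_bfs; infer_instance

def pvWitness_bfs : List (List Int) × (Int × Int) := ([[1, 1], [0, 1]], (0, 0))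

def Spec_bfs (grid : List (List Int)) (start : Int × Int) (out : List (Int × Int)) : Prop := out = bfs_alt grid start
instance (grid : List (List Int)) (start : Int × Int) (out : List (Int × Int)) : Decidable (Spec_bfs grid start out) := by unfold Spec_bfs; infer_instance

-- ===== CLAIM (what is proved, stated in full; the proofs are below) =====
def Claim_equal_bfs : Prop := ∀ (grid : List (List Int)) (start : Int × Int), Dom_bfs grid start → Pre_bfs grid start → Spec_bfs grid start (bfs grid start)

-- ===== LEMMAS AND PROOFS =====

-- the value of pvLoopA does not depend on the totality-guard proof
theorem pvLoopA_congr (grid : List (List Int)) (start : Int × Int)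
    {v v' : PySem.Set (Int × Int)} {q q' res res' : List (Int × Int)}
    (hv : v = v') (hqq : q = q') (hr : res = res')
    (h1 : ∀ c ∈ q, c ∈ pvCells grid start) (h2 : ∀ c ∈ q', c ∈ pvCells grid start) :
    pvLoopA grid start v q res h1 = pvLoopA grid start v' q' res' h2 := by
  subst hv hqq hr; rfl

-- running a level with next_frontier primed by nf just prepends nf to the level's own output
theorem pvStep_acc (grid : List (List Int)) (f : List (Int × Int))
    (v : PySem.Set (Int × Int)) (res nf : List (Int × Int)) :
    f.foldl (pvStep grid) (v, res, nf) =
      ((f.foldl (pvStep grid) (v, res, [])).1,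
       (f.foldl (pvStep grid) (v, res, [])).2.1,
       nf ++ (f.foldl (pvStep grid) (v, res, [])).2.2) := by
  induction f generalizing v res nf with
  | nil => simp
  | cons c f' ih =>
    simp only [List.foldl_cons]
    by_cases hc : c ∈ v
    · have h1 : pvStep grid (v, res, nf) c = (v, res, nf) := by unfold pvStep; simp [hc]
      have h2 : pvStep grid (v, res, []) c = (v, res, []) := by unfold pvStep; simp [hc]
      rw [h1, h2, ih]
    · have h1 : pvStep grid (v, res, nf) c =
          (PySem.Set.add v c, res ++ [c], nf ++ pvNbrs grid (PySem.Set.add v c) c) := by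
        unfold pvStep; simp [hc]
      have h2 : pvStep grid (v, res, []) c =
          (PySem.Set.add v c, res ++ [c], pvNbrs grid (PySem.Set.add v c) c) := by
        unfold pvStep; simp [hc]
      rw [h1, h2]
      rw [ih (PySem.Set.add v c) (res ++ [c]) (nf ++ pvNbrs grid (PySem.Set.add v c) c),
          ih (PySem.Set.add v c) (res ++ [c]) (pvNbrs grid (PySem.Set.add v c) c)]
      simp

-- A's queue is always "rest of the current level ++ accumulated next level": popping one
-- whole level off the queue is exactly one pvStep pass of B
theorem pvLoopA_level (grid : List (List Int)) (start : Int × Int)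
    (f : List (Int × Int)) (v : PySem.Set (Int × Int)) (q0 res : List (Int × Int))
    (h1 : ∀ c ∈ f ++ q0, c ∈ pvCells grid start)
    (h2 : ∀ c ∈ q0 ++ (f.foldl (pvStep grid) (v, res, [])).2.2, c ∈ pvCells grid start) :
    pvLoopA grid start v (f ++ q0) res h1 =
      pvLoopA grid start (f.foldl (pvStep grid) (v, res, [])).1
        (q0 ++ (f.foldl (pvStep grid) (v, res, [])).2.2)
        (f.foldl (pvStep grid) (v, res, [])).2.1 h2 := by
  induction f generalizing v q0 res with
  | nil => simp
  | cons c f' ih =>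
    simp only [List.cons_append] at h1 ⊢
    simp only [List.foldl_cons] at h2 ⊢
    by_cases hc : c ∈ v
    · have hs : pvStep grid (v, res, []) c = (v, res, []) := by unfold pvStep; simp [hc]
      rw [pvLoopA]
      simp only [hc, dite_true]
      have h1' : ∀ x ∈ f' ++ q0, x ∈ pvCells grid start :=
        fun x hx => h1 x (List.mem_cons_of_mem _ hx)
      have h2' : ∀ x ∈ q0 ++ (f'.foldl (pvStep grid) (v, res, [])).2.2,
          x ∈ pvCells grid start := by rw [hs] at h2; exact h2
      exact (ih v q0 res h1' h2').trans
        (pvLoopA_congr grid start (by rw [hs]) (by rw [hs]) (by rw [hs]) h2' _)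
    · have hs : pvStep grid (v, res, []) c =
          (PySem.Set.add v c, res ++ [c], pvNbrs grid (PySem.Set.add v c) c) := by
        unfold pvStep; simp [hc]
      rw [pvLoopA]
      simp only [hc, dite_false]
      have hT := pvStep_acc grid f' (PySem.Set.add v c) (res ++ [c])
        (pvNbrs grid (PySem.Set.add v c) c)
      have hm1 : ∀ x ∈ f' ++ (q0 ++ pvNbrs grid (PySem.Set.add v c) c),
          x ∈ pvCells grid start := by
        intro x hx
        rcases List.mem_append.1 hx with h | h
        · exact h1 x (List.mem_cons_of_mem _ (List.mem_append.2 (Or.inl h)))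
        · rcases List.mem_append.1 h with h' | h'
          · exact h1 x (List.mem_cons_of_mem _ (List.mem_append.2 (Or.inr h')))
          · exact pvNbrs_subset_cells grid start _ c x h'
      have hm2 : ∀ x ∈ (q0 ++ pvNbrs grid (PySem.Set.add v c) c) ++
          (f'.foldl (pvStep grid) (PySem.Set.add v c, res ++ [c], [])).2.2,
          x ∈ pvCells grid start := by
        intro x hx
        rcases List.mem_append.1 hx with h | h
        · rcases List.mem_append.1 h with h' | h'
          · exact h1 x (List.mem_cons_of_mem _ (List.mem_append.2 (Or.inr h')))
          · exact pvNbrs_subset_cells grid start _ c x h'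
        · exact pvStep_nf_subset grid start f' _ (by intro y hy; simp at hy) x h
      calc pvLoopA grid start (PySem.Set.add v c)
            (f' ++ q0 ++ pvNbrs grid (PySem.Set.add v c) c) (res ++ [c]) _
          = pvLoopA grid start (PySem.Set.add v c)
            (f' ++ (q0 ++ pvNbrs grid (PySem.Set.add v c) c)) (res ++ [c]) hm1 :=
            pvLoopA_congr grid start rfl (List.append_assoc _ _ _) rfl _ hm1
        _ = pvLoopA grid start
            (f'.foldl (pvStep grid) (PySem.Set.add v c, res ++ [c], [])).1
            ((q0 ++ pvNbrs grid (PySem.Set.add v c) c) ++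
              (f'.foldl (pvStep grid) (PySem.Set.add v c, res ++ [c], [])).2.2)
            (f'.foldl (pvStep grid) (PySem.Set.add v c, res ++ [c], [])).2.1 hm2 :=
            ih (PySem.Set.add v c) (q0 ++ pvNbrs grid (PySem.Set.add v c) c) (res ++ [c]) hm1 hm2
        _ = _ := pvLoopA_congr grid start (by rw [hs, hT]) (by rw [hs, hT]; simp)
          (by rw [hs, hT]) hm2 _

-- the two loops compute the same traversal
theorem pvLoopAB (grid : List (List Int)) (start : Int × Int)
    (v : PySem.Set (Int × Int)) (f res : List (Int × Int))
    (hf : ∀ c ∈ f, c ∈ pvCells grid start) :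
    pvLoopA grid start v f res hf = pvLoopB grid start v f res hf := by
  induction v, f, res, hf using pvLoopB.induct grid start with
  | case1 v res hf =>
    rw [pvLoopA, pvLoopB]
    simp
  | case2 v f res hf hne t ih =>
    rw [pvLoopB]
    simp only [hne, dite_false]
    have hm0 : ∀ x ∈ f ++ ([] : List (Int × Int)), x ∈ pvCells grid start :=
      fun x hx => hf x (by simpa using hx)
    have hm2 : ∀ x ∈ ([] : List (Int × Int)) ++ (f.foldl (pvStep grid) (v, res, [])).2.2,
        x ∈ pvCells grid start := by
      intro x hx
      exact pvStep_nf_subset grid start f _ (fun y hy => absurd hy (List.not_mem_nil)) x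
        (by simpa using hx)
    calc pvLoopA grid start v f res hf
        = pvLoopA grid start v (f ++ []) res hm0 :=
          pvLoopA_congr grid start rfl (List.append_nil f).symm rfl hf hm0
      _ = pvLoopA grid start (f.foldl (pvStep grid) (v, res, [])).1
          ([] ++ (f.foldl (pvStep grid) (v, res, [])).2.2)
          (f.foldl (pvStep grid) (v, res, [])).2.1 hm2 :=
          pvLoopA_level grid start f v [] res hm0 hm2
      _ = _ := (pvLoopA_congr grid start rfl
          (show ([] : List (Int × Int)) ++ t.2.2 = t.2.2 from List.nil_append _)
          rfl hm2 _).trans ih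

-- ===== VERDICT (by name: the statement is the Claim_ definition above) =====
theorem bfs_spec : Claim_equal_bfs := by
  intro grid start _ _
  unfold Spec_bfs bfs bfs_alt
  exact pvLoopAB grid start _ _ _ _
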